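-- pv_equiv track=rewrite | github.com/ageneric/conversion-calculator | digit.py | two_complement_value
-- ===== SOURCE A (Python) =====
-- def two_complement_value(digits: iter, base=2):
--     total = 0
--     place_exponent = 0
--     complement_bit, *normal_bits = digits
--
--     # Add each digit's place value, least digit first. self.digits[::-1]
--     for bit in reversed(normal_bits):
--         total += bit * base ** place_exponent
--         place_exponent += 1
--     # Add the most significant, negative value bit.
--     total += complement_bit * -1 * base ** place_exponent
--
--     return total
-- ===== SOURCE B (Python) =====
-- def two_complement_value(digits: iter, base=2):
--     # Horner's rule: one pass, O(n) multiplications; flip the sign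
--     # of the leading (complement) digit with a single subtraction.
--     digits = list(digits)
--     total = 0
--     for d in digits:
--         total = total * base + d
--     return total - digits[0] * 2 * base ** (len(digits) - 1)
-- ===== Notes on version B (the rewrite author's own statement) =====
-- stated objective: faster
-- what changed: Replaces the reversed-list loop that recomputes base**exponent at every step with a single forward Horner pass plus one subtraction to negate the complement digit.
import Mathlib
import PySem

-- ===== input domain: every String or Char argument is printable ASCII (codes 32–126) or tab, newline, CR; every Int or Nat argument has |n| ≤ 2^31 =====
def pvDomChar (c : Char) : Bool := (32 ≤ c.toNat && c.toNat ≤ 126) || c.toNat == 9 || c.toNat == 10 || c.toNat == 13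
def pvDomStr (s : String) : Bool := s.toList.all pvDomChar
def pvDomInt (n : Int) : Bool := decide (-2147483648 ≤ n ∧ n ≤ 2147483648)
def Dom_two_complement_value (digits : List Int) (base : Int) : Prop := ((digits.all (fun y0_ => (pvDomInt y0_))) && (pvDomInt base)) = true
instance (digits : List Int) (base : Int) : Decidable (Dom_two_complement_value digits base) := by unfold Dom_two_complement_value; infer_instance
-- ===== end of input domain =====

-- B changes the algorithm (one forward Horner pass + one subtraction instead of
-- recomputing base**exponent in a reversed loop); equal return value on nonempty digits.

-- ===== PORT A =====
-- A: unpack head, fold over reversed tail keeping (total, place_exponent), then add head term.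
def two_complement_value (digits : List Int) (base : Int) : Int :=
  match digits with
  | [] => 0  -- unreachable under Pre_: Python raises ValueError unpacking an empty list
  | complement_bit :: normal_bits =>
    let r := normal_bits.reverse.foldl
      (fun (st : Int × Nat) bit => (st.1 + bit * base ^ st.2, st.2 + 1)) (0, 0)
    r.1 + complement_bit * (-1) * base ^ r.2

-- ===== PORT B =====
-- B: Horner pass, then subtract twice the leading digit's place value.
def two_complement_value_alt (digits : List Int) (base : Int) : Int :=
  let total := digits.foldl (fun t d => t * base + d) 0
  match digits with
  | [] => 0  -- unreachable under Pre_: Python raises IndexError on digits[0]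
  | c :: _ => total - c * 2 * base ^ (digits.length - 1)

-- ===== PRECONDITION & SPEC =====
-- Pre_ excludes only the empty list, on which Python A raises ValueError (starred unpacking).
def Pre_two_complement_value (digits : List Int) (base : Int) : Prop := digits ≠ []
instance (digits : List Int) (base : Int) : Decidable (Pre_two_complement_value digits base) := by unfold Pre_two_complement_value; infer_instance
def pvWitness_two_complement_value : List Int × Int := ([1, 0, 1, 1], 2)
def Spec_two_complement_value (digits : List Int) (base : Int) (out : Int) : Prop := out = two_complement_value_alt digits base
instance (digits : List Int) (base : Int) (out : Int) : Decidable (Spec_two_complement_value digits base out) := by unfold Spec_two_complement_value; infer_instance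

-- ===== CLAIM (what is proved, stated in full; the proofs are below) =====
def Claim_equal_two_complement_value : Prop := ∀ (digits : List Int) (base : Int), Dom_two_complement_value digits base → Pre_two_complement_value digits base → Spec_two_complement_value digits base (two_complement_value digits base)

-- ===== LEMMAS AND PROOFS =====

-- Horner fold from an arbitrary starting accumulator.
theorem horner_shift (base : Int) (l : List Int) : ∀ t : Int,
    l.foldl (fun t d => t * base + d) t
      = t * base ^ l.length + l.foldl (fun t d => t * base + d) 0 := by
  induction l with
  | nil => intro t; simp
  | cons a rest ih =>
    intro t
    simp only [List.foldl_cons, List.length_cons]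
    rw [ih (t * base + a), ih (0 * base + a)]
    ring

-- A's reversed fold computes (Horner value of the tail, its length).
theorem rev_fold_eq (base : Int) (ns : List Int) :
    ns.reverse.foldl (fun (st : Int × Nat) bit => (st.1 + bit * base ^ st.2, st.2 + 1)) (0, 0)
      = (ns.foldl (fun t d => t * base + d) 0, ns.length) := by
  induction ns with
  | nil => simp
  | cons a rest ih =>
    simp only [List.reverse_cons, List.foldl_append, ih, List.foldl_cons, List.foldl_nil, List.length_cons]
    refine Prod.ext ?_ rfl
    rw [horner_shift base rest (0 * base + a)]
    ring

-- ===== VERDICT (by name: the statement is the Claim_ definition above) =====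
theorem two_complement_value_spec : Claim_equal_two_complement_value := by
  intro digits base _ hpre
  unfold Spec_two_complement_value two_complement_value two_complement_value_alt
  match digits with
  | [] => exact absurd rfl hpre
  | c :: ns =>
    simp only [rev_fold_eq, List.foldl_cons, List.length_cons, Nat.add_sub_cancel]
    rw [horner_shift base ns (0 * base + c)]
    ring
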